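-- pv_equiv track=rewrite | github.com/kykyzhapol/Case_13 | main.py | find_available_pump
-- ===== SOURCE A (Python) =====
-- def find_available_pump(oil_type: int, current_queues: dict,
--                         setup_data: dict) -> int | None:
--     '''
--     Find suitable pump for refueling based on fuel type and queue status.
--
--     Searches through all pumps to find one that:
--     1. Supports the required fuel type
--     2. Has available queue slots
--     Then selects the pump with the shortest queue among available options.
--
--     Args:
--         oil_type (int): Type of fuel needed (80, 92, 95, or 98)
--         current_queues (dict): Current state of all pumps with queues
--         setup_data (dict): Pump configuration data with max queues and fuel types
--
--     Returns:
--         int | None: Pump number if available, None if no suitable pump found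
--     '''
--     available_pumps = []
--
--     for pump_num, pump_info in setup_data.items():
--         max_queue, available_oils = pump_info[0], pump_info[1]
--
--         # Check if pump supports required fuel and has free queue slots
--         if oil_type in available_oils:
--             if current_queues[pump_num][0] < max_queue:
--                 available_pumps.append(pump_num)
--
--     if available_pumps:
--         # Select pump with shortest queue for optimal customer distribution
--         return min(available_pumps, key=lambda x: current_queues[x][0])
--     else:
--         return None
-- ===== SOURCE B (Python) =====
-- def find_available_pump(oil_type: int, current_queues: dict,
--                         setup_data: dict) -> int | None:
--     # Single pass keeping a running minimum instead of build-a-list-then-min.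
--     best = None  # (pump_num, queue_len) of the shortest-queue suitable pump so far
--     for pump_num, pump_info in setup_data.items():
--         max_queue, available_oils = pump_info[0], pump_info[1]
--         if oil_type in available_oils:
--             q = current_queues[pump_num][0]
--             if q < max_queue and (best is None or q < best[1]):
--                 best = (pump_num, q)
--     return best[0] if best is not None else None
-- ===== Notes on version B (the rewrite author's own statement) =====
-- stated objective: simpler
-- what changed: Replaces the two-pass build-a-candidate-list-then-min(key=...) structure with one fused pass over setup_data that keeps a running (best_pump, best_queue) minimum, using strict < so the first pump at the minimal queue wins exactly as Python's min does.
import Mathlib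
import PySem

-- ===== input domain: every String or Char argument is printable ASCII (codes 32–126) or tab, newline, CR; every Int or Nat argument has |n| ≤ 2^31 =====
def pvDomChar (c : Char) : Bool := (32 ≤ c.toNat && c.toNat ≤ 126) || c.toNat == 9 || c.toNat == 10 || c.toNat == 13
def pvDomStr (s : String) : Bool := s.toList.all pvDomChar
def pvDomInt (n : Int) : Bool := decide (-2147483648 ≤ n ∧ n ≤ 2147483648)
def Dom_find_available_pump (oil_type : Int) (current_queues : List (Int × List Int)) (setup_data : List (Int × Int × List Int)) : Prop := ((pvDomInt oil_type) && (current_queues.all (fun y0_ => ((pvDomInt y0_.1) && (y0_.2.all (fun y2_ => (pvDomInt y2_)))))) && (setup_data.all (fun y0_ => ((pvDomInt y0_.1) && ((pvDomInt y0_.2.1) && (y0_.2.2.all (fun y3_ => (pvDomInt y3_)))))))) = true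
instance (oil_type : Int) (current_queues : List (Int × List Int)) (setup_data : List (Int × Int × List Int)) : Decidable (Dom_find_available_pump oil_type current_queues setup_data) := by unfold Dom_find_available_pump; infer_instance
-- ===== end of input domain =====

-- B fuses A's build-a-list-then-min two-pass structure into one pass with a running minimum.


-- shared helpers: current_queues[p][0] — get? ∘ head; Python raises KeyError/IndexError
-- exactly when pvQhead? is none, which Pre_ excludes, so the getD 0 default is unreachable.
def pvQhead? (cq : List (Int × List Int)) (p : Int) : Option Int :=
  ((PySem.Dict.ofList cq).get? p).bind (fun l => PySem.List.pyGet? l 0)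
def pvQ (cq : List (Int × List Int)) (p : Int) : Int := (pvQhead? cq p).getD 0

-- ===== PORT A =====
-- loop body of A: append qualifying pump numbers
def pvAstep (oil_type : Int) (cq : List (Int × List Int)) (acc : List Int) (x : Int × Int × List Int) : List Int :=
  if oil_type ∈ x.2.2 then (if pvQ cq x.1 < x.2.1 then acc ++ [x.1] else acc) else acc

def find_available_pump (oil_type : Int) (current_queues : List (Int × List Int)) (setup_data : List (Int × Int × List Int)) : Option Int :=
  let available_pumps := (PySem.Dict.ofList setup_data).items.foldl (pvAstep oil_type current_queues) []
  if available_pumps.isEmpty then none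
  else PySem.List.min? available_pumps (fun x => pvQ current_queues x)

-- ===== PORT B =====
-- loop body of B: running (best_pump, best_queue) minimum
def pvBstep (oil_type : Int) (cq : List (Int × List Int)) (best : Option (Int × Int)) (x : Int × Int × List Int) : Option (Int × Int) :=
  if oil_type ∈ x.2.2 then
    if pvQ cq x.1 < x.2.1 then
      match best with
      | none => some (x.1, pvQ cq x.1)
      | some b => if pvQ cq x.1 < b.2 then some (x.1, pvQ cq x.1) else some b
    else best
  else best

def find_available_pump_alt (oil_type : Int) (current_queues : List (Int × List Int)) (setup_data : List (Int × Int × List Int)) : Option Int :=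
  match (PySem.Dict.ofList setup_data).items.foldl (pvBstep oil_type current_queues) none with
  | none => none
  | some b => some b.1

-- ===== PRECONDITION & SPEC =====
-- Pre_ excludes exactly the inputs where Python A raises: a pump in setup_data supporting
-- oil_type whose key is missing from current_queues (KeyError) or has an empty queue list (IndexError).
def Pre_find_available_pump (oil_type : Int) (current_queues : List (Int × List Int)) (setup_data : List (Int × Int × List Int)) : Prop :=
  ∀ x ∈ (PySem.Dict.ofList setup_data).items, oil_type ∈ x.2.2 → pvQhead? current_queues x.1 ≠ none
instance (oil_type : Int) (current_queues : List (Int × List Int)) (setup_data : List (Int × Int × List Int)) : Decidable (Pre_find_available_pump oil_type current_queues setup_data) := by unfold Pre_find_available_pump; infer_instance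
def pvWitness_find_available_pump : Int × (List (Int × List Int)) × (List (Int × Int × List Int)) := (92, [(1, [0])], [(1, (3, [92]))])

def Spec_find_available_pump (oil_type : Int) (current_queues : List (Int × List Int)) (setup_data : List (Int × Int × List Int)) (out : Option Int) : Prop := out = find_available_pump_alt oil_type current_queues setup_data
instance (oil_type : Int) (current_queues : List (Int × List Int)) (setup_data : List (Int × Int × List Int)) (out : Option Int) : Decidable (Spec_find_available_pump oil_type current_queues setup_data out) := by unfold Spec_find_available_pump; infer_instance

-- ===== CLAIM (what is proved, stated in full; the proofs are below) =====
def Claim_equal_find_available_pump : Prop := ∀ (oil_type : Int) (current_queues : List (Int × List Int)) (setup_data : List (Int × Int × List Int)), Dom_find_available_pump oil_type current_queues setup_data → Pre_find_available_pump oil_type current_queues setup_data → Spec_find_available_pump oil_type current_queues setup_data (find_available_pump oil_type current_queues setup_data)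

-- ===== LEMMAS AND PROOFS =====

-- B's running state is the first-wins minimum (with its key) of A's accumulated list.
def pvPack (cq : List (Int × List Int)) (acc : List Int) : Option (Int × Int) :=
  (PySem.List.min? acc (fun x => pvQ cq x)).map (fun m => (m, pvQ cq m))

theorem pvMin_append (cq : List (Int × List Int)) (acc : List Int) (p : Int) :
    PySem.List.min? (acc ++ [p]) (fun x => pvQ cq x) =
      match PySem.List.min? acc (fun x => pvQ cq x) with
      | none => some p
      | some m => if pvQ cq p < pvQ cq m then some p else some m := by
  cases hx : PySem.List.min? acc (fun x => pvQ cq x) with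
  | none =>
      have hacc := (PySem.List.min?_eq_none_iff _ _).mp hx
      subst hacc
      rfl
  | some m =>
      unfold PySem.List.min? at hx ⊢
      rw [List.foldl_append, hx]
      simp

theorem pvStep_pack (oil_type : Int) (cq : List (Int × List Int)) (acc : List Int) (x : Int × Int × List Int) :
    pvBstep oil_type cq (pvPack cq acc) x = pvPack cq (pvAstep oil_type cq acc x) := by
  unfold pvBstep pvAstep pvPack
  split_ifs with h1 h2
  · rw [pvMin_append]
    cases PySem.List.min? acc (fun x => pvQ cq x) with
    | none => simp
    | some m => by_cases hq : pvQ cq x.1 < pvQ cq m <;> simp [hq]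
  · rfl
  · rfl

theorem pvFold_pack (oil_type : Int) (cq : List (Int × List Int)) :
    ∀ (l : List (Int × Int × List Int)) (acc : List Int),
      l.foldl (pvBstep oil_type cq) (pvPack cq acc) =
        pvPack cq (l.foldl (pvAstep oil_type cq) acc) := by
  intro l
  induction l with
  | nil => intro acc; rfl
  | cons x t ih =>
      intro acc
      simp only [List.foldl_cons, pvStep_pack, ih]

-- ===== VERDICT (by name: the statement is the Claim_ definition above) =====
theorem find_available_pump_spec : Claim_equal_find_available_pump := by
  intro oil_type cq sd _ _
  unfold Spec_find_available_pump find_available_pump find_available_pump_alt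
  have h0 : (none : Option (Int × Int)) = pvPack cq [] := rfl
  rw [h0, pvFold_pack]
  set avail := (PySem.Dict.ofList sd).items.foldl (pvAstep oil_type cq) [] with havail
  unfold pvPack
  cases hm : PySem.List.min? avail (fun x => pvQ cq x) with
  | none =>
      have : avail = [] := (PySem.List.min?_eq_none_iff _ _).mp hm
      simp [this]
  | some m =>
      have : avail ≠ [] := by
        intro h; rw [h] at hm; simp [PySem.List.min?] at hm
      simp [List.isEmpty_iff, this, hm]
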